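-- pv_equiv track=rewrite | github.com/ksj15242/Algorithm | 프로그래머스/2/142085. 디펜스 게임/디펜스 게임.py | solution
-- ===== SOURCE A (Python) =====
-- import heapq
--
-- def solution(n, k, enemy):
--     life = n
--     heap = []
--
--     for stage, cur_enemy in enumerate(enemy):
--         heapq.heappush(heap, -cur_enemy)
--         life -= cur_enemy
--
--         if life<0:
--             if k>0:
--                 life += -heapq.heappop(heap)
--                 k -= 1
--             else:
--                 return stage
--
--     return len(enemy)
-- ===== SOURCE B (Python) =====
-- def solution(n, k, enemy):
--     shields = max(k, 0)
--     life = n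
--     prefix = []          # enemies fought so far without a shield
--     i = 0
--     while True:
--         # march through stages we can pay for outright
--         while i < len(enemy) and life >= enemy[i]:
--             prefix.append(enemy[i])
--             life -= enemy[i]
--             i += 1
--         if i == len(enemy):
--             return len(enemy)
--         if shields == 0:
--             return i
--         # shield the largest enemy met so far (including this one), refund it
--         prefix.append(enemy[i])
--         m = max(prefix)
--         prefix.remove(m)
--         life += m - enemy[i]
--         shields -= 1
--         i += 1
-- ===== Notes on version B (the rewrite author's own statement) =====
-- stated objective: alternative
-- what changed: Same greedy strategy but a different structure: the lazy max-heap of negated enemies is replaced by a plain prefix list queried with max/remove only when a shield is spent, and the single for-loop becomes a nested march-until-blocked/spend-shield loop that tests affordability before paying.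
import Mathlib
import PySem

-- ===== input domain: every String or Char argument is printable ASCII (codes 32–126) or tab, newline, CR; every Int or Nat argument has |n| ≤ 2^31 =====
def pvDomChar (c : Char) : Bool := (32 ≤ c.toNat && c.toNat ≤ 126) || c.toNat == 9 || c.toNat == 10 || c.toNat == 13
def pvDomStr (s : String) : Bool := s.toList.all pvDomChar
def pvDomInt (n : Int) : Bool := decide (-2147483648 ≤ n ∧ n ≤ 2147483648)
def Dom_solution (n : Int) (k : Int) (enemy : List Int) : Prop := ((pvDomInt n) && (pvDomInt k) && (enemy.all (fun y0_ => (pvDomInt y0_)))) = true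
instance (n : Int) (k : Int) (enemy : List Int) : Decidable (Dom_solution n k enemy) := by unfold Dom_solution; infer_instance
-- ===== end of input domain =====

-- B replaces A's lazy max-heap with a plain prefix list (max/remove at shield time) and a
-- nested-loop "march until blocked, then shield" decomposition; objective: alternative, not faster.

-- ===== PORT A =====
-- heapq on a list of ints is used only through heappush/heappop; it is modeled value-exactly
-- as an ascending sorted list: heappush = sorted insert, heappop = head (the minimum, exactly
-- the value Python's heappop returns; only values ever reach life/the result).
def heapPush (x : Int) : List Int → List Int
  | [] => [x]
  | y :: t => if x ≤ y then x :: y :: t else y :: heapPush x t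

-- the for-loop of A: state (k, life, heap, stage), iterating over the remaining enemies
def solutionLoop (k : Int) (life : Int) (heap : List Int) (stage : Nat) : List Int → Int
  | [] => (stage : Int)                      -- loop ended: return len(enemy)
  | e :: rest =>
    let heap' := heapPush (-e) heap          -- heapq.heappush(heap, -cur_enemy)
    let life' := life - e                    -- life -= cur_enemy
    if life' < 0 then
      if k > 0 then
        match heap' with
        | [] => 0                            -- unreachable: heap' just received a push
        | m :: h' => solutionLoop (k - 1) (life' + (-m)) h' (stage + 1) rest
      else (stage : Int)                     -- return stage
    else solutionLoop k life' heap' (stage + 1) rest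

def solution (n : Int) (k : Int) (enemy : List Int) : Int :=
  solutionLoop k n [] 0 enemy

-- ===== PORT B =====
-- inner while: march through stages we can pay for outright; returns the updated
-- (life, prefix, i, remaining enemies)
def altInner (life : Int) (pref : List Int) (i : Nat) : List Int → Int × List Int × Nat × List Int
  | [] => (life, pref, i, [])
  | e :: t =>
    if e ≤ life then altInner (life - e) (pref ++ [e]) (i + 1) t
    else (life, pref, i, e :: t)

theorem altInner_rest_length (life : Int) (pref : List Int) (i : Nat) (rest : List Int) :
    (altInner life pref i rest).2.2.2.length ≤ rest.length := by
  induction rest generalizing life pref i with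
  | nil => simp [altInner]
  | cons e t ih =>
    simp only [altInner]
    split
    · exact le_trans (ih _ _ _) (Nat.le_succ _)
    · simp

-- outer while True loop of B
def altOuter (shields : Int) (life : Int) (pref : List Int) (i : Nat) (rest : List Int) : Int :=
  let r := altInner life pref i rest
  if hr : r.2.2.2 = [] then (r.2.2.1 : Int)  -- i == len(enemy): return len(enemy)
  else if shields == 0 then (r.2.2.1 : Int)  -- return i
  else
    let e := r.2.2.2.head hr                 -- enemy[i], the blocking stage
    let pref2 := r.2.1 ++ [e]
    let m := (PySem.List.max? pref2 (fun x => x)).getD 0   -- max(prefix); pref2 ≠ []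
    altOuter (shields - 1) (r.1 + m - e) ((PySem.List.remove? pref2 m).getD pref2)
      (r.2.2.1 + 1) r.2.2.2.tail
termination_by rest.length
decreasing_by
  have h1 := altInner_rest_length life pref i rest
  have h2 : (altInner life pref i rest).2.2.2.length ≠ 0 := by
    simpa [List.length_eq_zero_iff] using hr
  have h3 := List.length_tail (l := (altInner life pref i rest).2.2.2)
  omega

def solution_alt (n : Int) (k : Int) (enemy : List Int) : Int :=
  altOuter (max k 0) n [] 0 enemy

-- ===== PRECONDITION & SPEC =====
def Spec_solution (n : Int) (k : Int) (enemy : List Int) (out : Int) : Prop := out = solution_alt n k enemy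
instance (n : Int) (k : Int) (enemy : List Int) (out : Int) : Decidable (Spec_solution n k enemy out) := by unfold Spec_solution; infer_instance

-- ===== CLAIM (what is proved, stated in full; the proofs are below) =====
def Claim_equal_solution : Prop := ∀ (n : Int) (k : Int) (enemy : List Int), Dom_solution n k enemy → Spec_solution n k enemy (solution n k enemy)

-- ===== LEMMAS AND PROOFS =====

theorem heapPush_perm (x : Int) (h : List Int) : (heapPush x h).Perm (x :: h) := by
  induction h with
  | nil => simp [heapPush]
  | cons y t ih =>
    simp only [heapPush]
    split
    · exact List.Perm.refl _
    · exact (List.Perm.cons y ih).trans (List.Perm.swap x y t)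

theorem heapPush_sorted (x : Int) (h : List Int) (hs : h.Pairwise (· ≤ ·)) :
    (heapPush x h).Pairwise (· ≤ ·) := by
  induction h with
  | nil => simp [heapPush]
  | cons y t ih =>
    simp only [heapPush]
    rcases List.pairwise_cons.mp hs with ⟨hy, ht⟩
    split
    · rename_i hxy
      refine List.pairwise_cons.mpr ⟨?_, hs⟩
      intro z hz
      rcases List.mem_cons.mp hz with rfl | hz
      · exact hxy
      · exact le_trans hxy (hy z hz)
    · rename_i hxy
      refine List.pairwise_cons.mpr ⟨?_, ih ht⟩
      intro z hz
      rcases List.mem_cons.mp ((heapPush_perm x t).mem_iff.mp hz) with rfl | hz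
      · omega
      · exact hy z hz

-- one-step unfoldings of B's outer loop
theorem altOuter_nil (s life : Int) (pref : List Int) (i : Nat) :
    altOuter s life pref i [] = (i : Int) := by
  rw [altOuter]; simp [altInner]

theorem altOuter_pay (s life e : Int) (pref : List Int) (i : Nat) (t : List Int)
    (h : e ≤ life) :
    altOuter s life pref i (e :: t) = altOuter s (life - e) (pref ++ [e]) (i + 1) t := by
  conv_lhs => rw [altOuter]
  conv_rhs => rw [altOuter]
  simp only [altInner, if_pos h]

theorem altOuter_deficit (s life e : Int) (pref : List Int) (i : Nat) (t : List Int)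
    (h : ¬ e ≤ life) :
    altOuter s life pref i (e :: t) =
      if s == 0 then (i : Int)
      else
        altOuter (s - 1)
          (life + ((PySem.List.max? (pref ++ [e]) (fun x => x)).getD 0) - e)
          ((PySem.List.remove? (pref ++ [e]) ((PySem.List.max? (pref ++ [e]) (fun x => x)).getD 0)).getD (pref ++ [e]))
          (i + 1) t := by
  rw [altOuter]
  simp only [altInner, if_neg h]
  rw [dif_neg (List.cons_ne_nil e t)]
  simp only [List.head_cons, List.tail_cons]

-- the maximum value of a list, via Python's max (first extremal element has the max VALUE)
theorem max?_getD_spec (xs : List Int) (hne : xs ≠ []) :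
    ((PySem.List.max? xs (fun x => x)).getD 0) ∈ xs ∧
      ∀ y ∈ xs, y ≤ (PySem.List.max? xs (fun x => x)).getD 0 := by
  rcases hm : PySem.List.max? xs (fun x => x) with _ | m
  · exact absurd ((PySem.List.max?_eq_none_iff xs _).mp hm) hne
  · exact ⟨by simpa using PySem.List.max?_mem hm, fun y hy => by
      simpa using PySem.List.max?_isMax hm y hy⟩

-- head of a sorted list permuted with (pref.map Neg.neg) is the negation of max(pref)
theorem sorted_head_eq_neg_max (pref : List Int) (m0 : Int) (h' : List Int)
    (hperm : (m0 :: h').Perm (pref.map (fun x => -x)))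
    (hsort : (m0 :: h').Pairwise (· ≤ ·)) :
    m0 = -((PySem.List.max? pref (fun x => x)).getD 0) := by
  have hne : pref ≠ [] := by
    rintro rfl
    simpa using hperm.length_eq
  obtain ⟨hmem, hmax⟩ := max?_getD_spec pref hne
  set m := (PySem.List.max? pref (fun x => x)).getD 0 with hm
  -- m0 is a member of the multiset, so m0 = -p for some p ∈ pref, hence -m ≤ m0
  have hm0mem : m0 ∈ pref.map (fun x => -x) := hperm.mem_iff.mp (List.mem_cons_self ..)
  obtain ⟨p, hp, rfl⟩ := List.mem_map.mp hm0mem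
  -- -m is in the permuted list, so it is ≥ head m0 by sortedness
  have hmmem : (-m) ∈ (-p) :: h' := hperm.mem_iff.mpr (List.mem_map.mpr ⟨m, hmem, rfl⟩)
  have hle : ∀ y ∈ h', -p ≤ y := (List.pairwise_cons.mp hsort).1
  have h1 : -p ≤ -m := by
    rcases List.mem_cons.mp hmmem with he | hmm
    · omega
    · exact hle _ hmm
  have h2 : p ≤ m := hmax p hp
  omega

-- the heap/prefix correspondence, and the main simulation lemma
theorem sim (rest : List Int) :
    ∀ (k life : Int) (heap pref : List Int) (stage : Nat),
      heap.Pairwise (· ≤ ·) → heap.Perm (pref.map (fun x => -x)) →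
      solutionLoop k life heap stage rest = altOuter (max k 0) life pref stage rest := by
  induction rest with
  | nil =>
    intro k life heap pref stage _ _
    simp [solutionLoop, altOuter_nil]
  | cons e t ih =>
    intro k life heap pref stage hsort hperm
    have hsort' : (heapPush (-e) heap).Pairwise (· ≤ ·) := heapPush_sorted _ _ hsort
    have hperm' : (heapPush (-e) heap).Perm ((pref ++ [e]).map (fun x => -x)) := by
      refine ((heapPush_perm (-e) heap).trans (List.Perm.cons (-e) hperm)).trans ?_
      simp only [List.map_append, List.map_cons, List.map_nil]
      exact (List.perm_append_singleton (-e) (pref.map (fun x => -x))).symm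
    by_cases hpay : e ≤ life
    · -- life' ≥ 0 branch of A; pay branch of B
      rw [altOuter_pay _ _ _ _ _ _ hpay]
      simp only [solutionLoop]
      rw [if_neg (by omega)]
      exact ih k (life - e) _ _ (stage + 1) hsort' hperm'
    · -- deficit: A checks k > 0, B checks shields == 0 (shields = max k 0)
      rw [altOuter_deficit _ _ _ _ _ _ hpay]
      simp only [solutionLoop]
      rw [if_pos (by omega)]
      by_cases hk : k > 0
      · rw [if_pos hk, if_neg (by simp; omega)]
        -- the popped head is the negated maximum of pref ++ [e]
        rcases hh : heapPush (-e) heap with _ | ⟨m0, h'⟩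
        · have hlen := (heapPush_perm (-e) heap).length_eq
          rw [hh] at hlen
          simp at hlen
        rw [hh] at hsort' hperm'
        set pref2 := pref ++ [e] with hpref2
        set m := (PySem.List.max? pref2 (fun x => x)).getD 0 with hm
        have hm0 : m0 = -m := sorted_head_eq_neg_max pref2 m0 h' hperm' hsort'
        have hne2 : pref2 ≠ [] := by simp [hpref2]
        obtain ⟨hmmem, _⟩ := max?_getD_spec pref2 hne2
        -- remove? removes the first occurrence of m, i.e. erases it
        have hrem : (PySem.List.remove? pref2 m).getD pref2 = pref2.erase m := by
          rw [PySem.List.remove?_eq_some_erase pref2 m hmmem]; rfl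
        rw [hrem]
        -- tail invariants
        have hsortT : h'.Pairwise (· ≤ ·) := (List.pairwise_cons.mp hsort').2
        have hpermT : h'.Perm ((pref2.erase m).map (fun x => -x)) := by
          have hmapNeg : (pref2.erase m).map (fun x => -x) = (pref2.map (fun x => -x)).erase (-m) :=
            List.map_erase (a := m) (fun a b hab => by omega) pref2
          rw [hmapNeg]
          have := hperm'.erase (-m)
          rw [hm0] at this
          simpa using this
        have hfin := ih (k - 1) (life + m - e) h' (pref2.erase m) (stage + 1) hsortT hpermT
        show solutionLoop (k - 1) (life - e + -m0) h' (stage + 1) t = _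
        rw [show life - e + -m0 = life + m - e by rw [hm0]; ring,
            show max k 0 - 1 = max (k - 1) 0 by omega]
        exact hfin
      · rw [if_neg hk, if_pos (by simp; omega)]

-- ===== VERDICT (by name: the statement is the Claim_ definition above) =====
theorem solution_spec : Claim_equal_solution := by
  intro n k enemy _
  unfold Spec_solution solution solution_alt
  exact sim enemy k n [] [] 0 (by simp) (by simp)
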